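-- pv_equiv track=rewrite | github.com/Jaeookk/algorithm | 성격 유형 검사하기.py | solution
-- ===== SOURCE A (Python) =====
-- from collections import defaultdict
--
-- def solution(survey, choices):
--     answer = ''
--     personality = [('R','T'),('C','F'),('J','M'),('A','N')]
--     result_dict = defaultdict(int)
--     for s,c in zip(survey, choices):
--         if c < 4:
--             result_dict[s[0]] += 4 - c
--         else:
--             result_dict[s[1]] += c - 4
--
--     for i in personality:
--         if result_dict[i[0]] >= result_dict[i[1]]: # 값이 같으면 사전순이므로
--             answer += i[0]
--         else: answer += i[1]
--
--     return answer
-- ===== SOURCE B (Python) =====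
-- def solution(survey, choices):
--     personality = [('R', 'T'), ('C', 'F'), ('J', 'M'), ('A', 'N')]
--     out = []
--     for a, b in personality:
--         net = 0
--         for s, c in zip(survey, choices):
--             letter = s[0] if c < 4 else s[1]
--             weight = 4 - c if c < 4 else c - 4
--             if letter == a:
--                 net += weight
--             elif letter == b:
--                 net -= weight
--         out.append(a if net >= 0 else b)
--     return ''.join(out)
-- ===== Notes on version B (the rewrite author's own statement) =====
-- stated objective: alternative
-- what changed: B drops the defaultdict entirely: it inverts the loops, scanning the survey once per indicator pair with a single signed accumulator (net of the two letters) and picking the first letter when net >= 0, instead of A's one-pass per-letter dict followed by pairwise score comparisons.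
import Mathlib
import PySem

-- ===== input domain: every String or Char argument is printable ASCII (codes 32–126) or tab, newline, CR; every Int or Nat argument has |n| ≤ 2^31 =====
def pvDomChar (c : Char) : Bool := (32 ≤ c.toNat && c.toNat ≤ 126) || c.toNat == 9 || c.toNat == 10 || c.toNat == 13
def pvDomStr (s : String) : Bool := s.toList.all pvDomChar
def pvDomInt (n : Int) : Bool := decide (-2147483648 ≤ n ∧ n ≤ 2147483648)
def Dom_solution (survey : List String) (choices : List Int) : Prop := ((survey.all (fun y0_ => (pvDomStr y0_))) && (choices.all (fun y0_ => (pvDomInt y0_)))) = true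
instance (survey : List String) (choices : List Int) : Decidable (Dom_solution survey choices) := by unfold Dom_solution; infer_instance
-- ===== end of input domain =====

-- B replaces A's per-letter defaultdict with one signed accumulator per indicator pair
-- (loops inverted: outer over the 4 pairs, inner over the survey); alternative decomposition, not faster.

-- ===== PORT A =====
-- s[i] for i = 0, 1; exact under Pre_solution (the index is in range there)
def pvCh (s : String) (i : Int) : Char := (PySem.Str.pyGet? s i).getD ' '

-- one iteration of A's first loop: result_dict[s[0]] += 4-c  /  result_dict[s[1]] += c-4
def solutionStep (d : PySem.Dict Char Int) (p : String × Int) : PySem.Dict Char Int :=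
  if p.2 < 4 then d.insert (pvCh p.1 0) (d.getD (pvCh p.1 0) 0 + (4 - p.2))
  else d.insert (pvCh p.1 1) (d.getD (pvCh p.1 1) 0 + (p.2 - 4))

def solution (survey : List String) (choices : List Int) : String :=
  let personality : List (Char × Char) := [('R','T'), ('C','F'), ('J','M'), ('A','N')]
  let d := (survey.zip choices).foldl solutionStep PySem.Dict.empty
  personality.foldl
    (fun answer i => if d.getD i.1 0 ≥ d.getD i.2 0 then answer.push i.1 else answer.push i.2) ""

-- ===== PORT B =====
-- B's inner loop body: letter/weight, then net += / -= / unchanged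
def altNetStep (a b : Char) (net : Int) (p : String × Int) : Int :=
  let letter := if p.2 < 4 then pvCh p.1 0 else pvCh p.1 1
  let weight := if p.2 < 4 then 4 - p.2 else p.2 - 4
  if letter = a then net + weight else if letter = b then net - weight else net

def solution_alt (survey : List String) (choices : List Int) : String :=
  let personality : List (Char × Char) := [('R','T'), ('C','F'), ('J','M'), ('A','N')]
  let out := personality.map
    (fun i => if (survey.zip choices).foldl (altNetStep i.1 i.2) 0 ≥ 0 then i.1 else i.2)
  String.ofList out

-- ===== PRECONDITION & SPEC =====
-- Pre_ excludes exactly the inputs where the Python A raises IndexError: a paired survey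
-- string too short for the index A reads (s[0] needs length ≥ 1, s[1] needs length ≥ 2).
def Pre_solution (survey : List String) (choices : List Int) : Prop :=
  ∀ p ∈ survey.zip choices,
    (p.2 < 4 → 1 ≤ PySem.Str.len p.1) ∧ (4 ≤ p.2 → 2 ≤ PySem.Str.len p.1)
instance (survey : List String) (choices : List Int) : Decidable (Pre_solution survey choices) := by
  unfold Pre_solution; infer_instance

def pvWitness_solution : List String × List Int := (["RT", "CF", "JM", "AN"], [2, 5, 4, 7])

def Spec_solution (survey : List String) (choices : List Int) (out : String) : Prop := out = solution_alt survey choices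
instance (survey : List String) (choices : List Int) (out : String) : Decidable (Spec_solution survey choices out) := by unfold Spec_solution; infer_instance

-- ===== CLAIM (what is proved, stated in full; the proofs are below) =====
def Claim_equal_solution : Prop := ∀ (survey : List String) (choices : List Int), Dom_solution survey choices → Pre_solution survey choices → Spec_solution survey choices (solution survey choices)

-- ===== LEMMAS AND PROOFS =====

-- the letter and weight a zipped pair (s, c) contributes in A's first loop
def pvKey (p : String × Int) : Char := if p.2 < 4 then pvCh p.1 0 else pvCh p.1 1
def pvWt (p : String × Int) : Int := if p.2 < 4 then 4 - p.2 else p.2 - 4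

-- total contribution of a list of pairs to letter l
def pvContrib (l : Char) (L : List (String × Int)) : Int :=
  (L.map (fun p => if pvKey p = l then pvWt p else 0)).sum

theorem pv_step_getD (d : PySem.Dict Char Int) (p : String × Int) (l : Char) :
    (solutionStep d p).getD l 0 = d.getD l 0 + (if pvKey p = l then pvWt p else 0) := by
  unfold solutionStep pvKey pvWt
  by_cases h : p.2 < 4 <;>
    simp only [h, if_true, if_false, PySem.Dict.getD_insert] <;>
    split_ifs with h1 h2 <;> simp_all [eq_comm]

theorem pv_dict_getD (L : List (String × Int)) (d : PySem.Dict Char Int) (l : Char) :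
    (L.foldl solutionStep d).getD l 0 = d.getD l 0 + pvContrib l L := by
  induction L generalizing d with
  | nil => simp [pvContrib]
  | cons p L ih =>
    simp only [List.foldl_cons, ih, pv_step_getD, pvContrib, List.map_cons, List.sum_cons]
    ring

theorem pv_net_eq (a b : Char) (hab : a ≠ b) (L : List (String × Int)) (n : Int) :
    L.foldl (altNetStep a b) n = n + pvContrib a L - pvContrib b L := by
  induction L generalizing n with
  | nil => simp [pvContrib]
  | cons p L ih =>
    simp only [List.foldl_cons, ih, pvContrib, List.map_cons, List.sum_cons]
    have hstep : altNetStep a b n p =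
        n + (if pvKey p = a then pvWt p else 0) - (if pvKey p = b then pvWt p else 0) := by
      unfold altNetStep pvKey pvWt
      by_cases ha : (if p.2 < 4 then pvCh p.1 0 else pvCh p.1 1) = a <;>
        by_cases hb : (if p.2 < 4 then pvCh p.1 0 else pvCh p.1 1) = b <;>
        simp_all
    rw [hstep]; ring

theorem pv_cond_iff (L : List (String × Int)) (a b : Char) (hab : a ≠ b) :
    ((L.foldl solutionStep PySem.Dict.empty).getD a 0 ≥
      (L.foldl solutionStep PySem.Dict.empty).getD b 0) ↔
    (L.foldl (altNetStep a b) 0 ≥ 0) := by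
  rw [pv_dict_getD, pv_dict_getD, pv_net_eq a b hab]
  simp only [PySem.Dict.getD_empty]
  omega

-- ===== VERDICT (by name: the statement is the Claim_ definition above) =====
theorem solution_spec : Claim_equal_solution := by
  intro survey choices _ _
  show solution survey choices = solution_alt survey choices
  simp only [solution, solution_alt, List.foldl_cons, List.foldl_nil, List.map_cons, List.map_nil]
  simp only [pv_cond_iff (survey.zip choices) 'R' 'T' (by decide),
    pv_cond_iff (survey.zip choices) 'C' 'F' (by decide),
    pv_cond_iff (survey.zip choices) 'J' 'M' (by decide),
    pv_cond_iff (survey.zip choices) 'A' 'N' (by decide)]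
  split_ifs <;> rfl
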